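-- pv_equiv track=rewrite | github.com/enan501/Algorithm-study | kakao/2021recruit/채용자.py | solution
-- ===== SOURCE A (Python) =====
-- from itertools import product
--
-- oper = {'cpp': 1000, 'java': 2000, 'python': 3000, 'backend': 100, 'frontend': 200, 'junior': 10, 'senior': 20,
--         'chicken': 1, 'pizza': 2}
--
-- def solution(info, query):
--     answer = []
--
--     infoMap = {}
--     for i in info:
--         sepInfo = i.split(" ")
--         key = calKey(sepInfo[:-1])
--         if key in infoMap:
--            infoMap[key].append(int(sepInfo[-1]))
--         else:
--             infoMap[key] = [int(sepInfo[-1])]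
--     for k in infoMap.keys():
--         infoMap[k].sort()
--     for q in query:
--         cnt = 0
--         sepQuery = q.replace(" and "," ").split(" ")
--         keys = calQueryKeys(sepQuery[:-1])
--         for key in keys:
--             if key in infoMap.keys():
--                 # cnt += len(list(filter(lambda x: x >= int(sepQuery[-1]), infoMap[key])))
--                 if infoMap[key][-1] < int(sepQuery[-1]):
--                     continue
--                 cnt += (len(infoMap[key]) - lowerbound(infoMap[key],int(sepQuery[-1])))
--
--         answer.append(cnt)
--     return answer
--
-- def calKey(sepInfo):
--
--     key = 0
--     for i in sepInfo:
--         key += oper[i]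
--     return key
--
-- def calQueryKeys(sepQuery):
--     keys = []
--     lang = ['cpp','java','python']
--     part = ['frontend','backend']
--     exp = ['junior','senior']
--     food = ['pizza','chicken']
--     conds = [lang,part,exp,food]
--     rQuery = []
--     for q,index in zip(sepQuery, range(0,len(sepQuery))):
--         if q == '-':
--             rQuery.append(conds[index])
--         else:
--             rQuery.append([q])
--     for rQ in list(product(*rQuery)):
--         keys.append(calKey(rQ))
--     return keys
--
-- def lowerbound(arr, target):
--     left, right = 0, len(arr) - 1
--
--     while (left < right):
--         mid = (left + right) // 2
--
--         if (arr[mid] < target):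
--             left = mid + 1
--         else:
--             right = mid
--
--     return right
-- ===== SOURCE B (Python) =====
-- def solution(info, query):
--     # Different algorithm: no dict/product/sort/binary-search; parse people once,
--     # then answer each query by a direct linear scan with wildcard matching.
--     people = []
--     for i in info:
--         l, p, e, f, s = i.split(" ")
--         people.append((l, p, e, f, int(s)))
--
--     answer = []
--     for q in query:
--         t = q.replace(" and ", " ").split(" ")
--         answer.append(sum(1 for (l, p, e, f, s) in people
--                           if (t[0] in ('-', l)) and (t[1] in ('-', p))
--                           and (t[2] in ('-', e)) and (t[3] in ('-', f))
--                           and s >= int(t[4])))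
--     return answer
-- ===== Notes on version B (the rewrite author's own statement) =====
-- stated objective: simpler
-- what changed: Replaces A's sum-keyed dict with 16-way wildcard key expansion, per-bucket sorting and a hand-written binary search by a direct per-query linear scan over once-parsed (lang,part,exp,food,score) tuples.
-- outside the precondition, e.g. on solution(['chicken chicken 5'], ['pizza 1']): A returns [1], B raises ValueError; on solution(['cpp backend junior pizza 5'], ['backend cpp junior pizza 3']): A returns [1], B returns [0]
import Mathlib
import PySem

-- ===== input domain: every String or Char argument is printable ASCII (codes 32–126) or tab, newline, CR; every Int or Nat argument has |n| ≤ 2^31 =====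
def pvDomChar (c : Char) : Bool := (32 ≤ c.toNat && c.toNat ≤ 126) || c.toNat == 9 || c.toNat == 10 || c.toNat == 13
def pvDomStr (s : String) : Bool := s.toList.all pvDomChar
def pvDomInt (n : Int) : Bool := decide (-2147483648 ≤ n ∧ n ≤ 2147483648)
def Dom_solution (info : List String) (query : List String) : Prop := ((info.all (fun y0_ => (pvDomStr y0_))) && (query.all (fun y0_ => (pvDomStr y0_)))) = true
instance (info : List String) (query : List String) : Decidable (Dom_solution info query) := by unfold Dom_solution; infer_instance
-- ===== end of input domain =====

-- B replaces A's sum-keyed dict (16-way wildcard key expansion, per-bucket sort, hand-written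
-- binary search) by a direct per-query linear scan over once-parsed tuples: simpler, same results.

-- ===== PORT A =====
def oper : PySem.Dict String Int := PySem.Dict.ofList
  [("cpp",1000),("java",2000),("python",3000),("backend",100),("frontend",200),
   ("junior",10),("senior",20),("chicken",1),("pizza",2)]

def calKey (sepInfo : List String) : Int :=
  sepInfo.foldl (fun key i => key + oper.getD i 0) 0

-- itertools.product(*lists) in CPython order (last factor varies fastest)
def listProd : List (List String) → List (List String)
  | [] => [[]]
  | l :: ls => l.flatMap (fun x => (listProd ls).map (x :: ·))

def calQueryKeys (sepQuery : List String) : List Int :=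
  let conds : List (List String) :=
    [["cpp","java","python"], ["frontend","backend"], ["junior","senior"], ["pizza","chicken"]]
  let rQuery := (PySem.List.enumerate sepQuery 0).foldl
    (fun acc qi =>
      if qi.2 == "-" then acc ++ [PySem.List.pyGetD conds qi.1 []]
      else acc ++ [[qi.2]]) []
  (listProd rQuery).foldl (fun keys rQ => keys ++ [calKey rQ]) []

def lowerboundGo (arr : List Int) (target : Int) : Nat → Int → Int → Int
  | 0, _, right => right
  | fuel+1, left, right =>
    if left < right then
      let mid := PySem.Int.floordiv (left + right) 2
      if PySem.List.pyGetD arr mid 0 < target then lowerboundGo arr target fuel (mid+1) right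
      else lowerboundGo arr target fuel left mid
    else right

def lowerbound (arr : List Int) (target : Int) : Int :=
  lowerboundGo arr target arr.length 0 ((arr.length : Int) - 1)

def solution (info : List String) (query : List String) : List Int :=
  let infoMap : PySem.Dict Int (List Int) := info.foldl (fun m i =>
    let sepInfo := (PySem.Str.split? i " ").getD []
    let key := calKey (PySem.List.slice sepInfo none (some (-1)))
    if m.contains key then
      m.modify key [] (· ++ [(PySem.Int.ofStr? (PySem.List.pyGetD sepInfo (-1) "")).getD 0])
    else
      m.insert key [(PySem.Int.ofStr? (PySem.List.pyGetD sepInfo (-1) "")).getD 0]) PySem.Dict.empty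
  let infoMap2 := infoMap.keys.foldl (fun m k =>
    m.insert k (PySem.List.sorted (m.getD k []) (fun x => x) false)) infoMap
  query.foldl (fun answer q =>
    let sepQuery := (PySem.Str.split? (PySem.Str.replace q " and " " ") " ").getD []
    let keys := calQueryKeys (PySem.List.slice sepQuery none (some (-1)))
    let cnt : Int := keys.foldl (fun cnt key =>
      match infoMap2.get? key with
      | none => cnt
      | some arr =>
        if PySem.List.pyGetD arr (-1) 0 <
            (PySem.Int.ofStr? (PySem.List.pyGetD sepQuery (-1) "")).getD 0 then cnt
        else cnt + ((arr.length : Int) -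
            lowerbound arr ((PySem.Int.ofStr? (PySem.List.pyGetD sepQuery (-1) "")).getD 0))) 0
    answer ++ [cnt]) []

-- ===== PORT B =====
def parsePerson (i : String) : String × String × String × String × Int :=
  let t := (PySem.Str.split? i " ").getD []
  (t.getD 0 "", t.getD 1 "", t.getD 2 "", t.getD 3 "", (PySem.Int.ofStr? (t.getD 4 "")).getD 0)

def matchesQ (t : List String) (pr : String × String × String × String × Int) : Bool :=
  (t.getD 0 "" == "-" || t.getD 0 "" == pr.1) && (t.getD 1 "" == "-" || t.getD 1 "" == pr.2.1)
  && (t.getD 2 "" == "-" || t.getD 2 "" == pr.2.2.1) && (t.getD 3 "" == "-" || t.getD 3 "" == pr.2.2.2.1)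
  && (PySem.Int.ofStr? (t.getD 4 "")).getD 0 ≤ pr.2.2.2.2

def solution_alt (info : List String) (query : List String) : List Int :=
  let people := info.map parsePerson
  query.foldl (fun answer q =>
    let t := (PySem.Str.split? (PySem.Str.replace q " and " " ") " ").getD []
    answer ++ [(people.countP (matchesQ t) : Int)]) []

-- ===== PRECONDITION & SPEC =====
-- Pre_ restricts to the problem's natural domain: each info string is "lang part exp food score"
-- and each query "l and p and e and f score" with every slot a token of its own category (or '-'
-- in a query) and an int-parsable score; with an EMPTY info list any queries whose pattern tokens
-- A can evaluate are also admitted (A answers 0 to each).  Outside it A usually raises (KeyError/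
-- IndexError/ValueError), and where it still returns, its sum-based key matches accidentally
-- (e.g. "chicken chicken" summing to the key of "pizza", or a query listing valid tokens in the
-- wrong order), an artefact of A's order-insensitive sum encoding that B does not reproduce.
def infoOK (i : String) : Bool :=
  match (PySem.Str.split? i " ").getD [] with
  | [l, p, e, f, s] =>
    ["cpp","java","python"].contains l && ["frontend","backend"].contains p
    && ["junior","senior"].contains e && ["pizza","chicken"].contains f
    && (PySem.Int.ofStr? s).isSome
  | _ => false

def queryOK (q : String) : Bool :=
  match (PySem.Str.split? (PySem.Str.replace q " and " " ") " ").getD [] with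
  | [l, p, e, f, s] =>
    ["-","cpp","java","python"].contains l && ["-","frontend","backend"].contains p
    && ["-","junior","senior"].contains e && ["-","pizza","chicken"].contains f
    && (PySem.Int.ofStr? s).isSome
  | _ => false

-- tokens Python's `oper` dict knows
def operKeys : List String :=
  ["cpp","java","python","backend","frontend","junior","senior","chicken","pizza"]

-- all pattern tokens (query words except the last) are oper tokens or '-' at slot < 4:
-- exactly what A needs to evaluate a query against an EMPTY info map without raising
def tokensLooseOK : List String → Nat → Bool
  | [], _ => true
  | tkn :: rest, j => (operKeys.contains tkn || (tkn == "-" && decide (j < 4))) && tokensLooseOK rest (j + 1)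

def queryLooseOK (q : String) : Bool :=
  tokensLooseOK (((PySem.Str.split? (PySem.Str.replace q " and " " ") " ").getD []).dropLast) 0

def Pre_solution (info : List String) (query : List String) : Prop :=
  info.all infoOK = true ∧
  (query.all queryOK = true ∨ (info = [] ∧ query.all queryLooseOK = true))

instance (info : List String) (query : List String) : Decidable (Pre_solution info query) := by
  unfold Pre_solution; infer_instance

def pvWitness_solution : List String × List String :=
  (["java backend junior pizza 150", "cpp frontend senior chicken 50"],
   ["java and backend and junior and pizza 100", "- and - and - and - 50"])

def Spec_solution (info : List String) (query : List String) (out : List Int) : Prop := out = solution_alt info query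
instance (info : List String) (query : List String) (out : List Int) : Decidable (Spec_solution info query out) := by unfold Spec_solution; infer_instance

-- ===== CLAIM (what is proved, stated in full; the proofs are below) =====
def Claim_equal_solution : Prop := ∀ (info : List String) (query : List String), Dom_solution info query → Pre_solution info query → Spec_solution info query (solution info query)

-- ===== LEMMAS AND PROOFS =====

-- person tuple helpers (proof-side)
def key4 (pr : String × String × String × String × Int) : Int :=
  calKey [pr.1, pr.2.1, pr.2.2.1, pr.2.2.2.1]

def scoreOf (pr : String × String × String × String × Int) : Int := pr.2.2.2.2

def validP (pr : String × String × String × String × Int) : Bool :=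
  ["cpp","java","python"].contains pr.1 && ["frontend","backend"].contains pr.2.1
  && ["junior","senior"].contains pr.2.2.1 && ["pizza","chicken"].contains pr.2.2.2.1

def bucket (people : List (String × String × String × String × Int)) (c : Int) : List Int :=
  (people.filter (fun pr => key4 pr == c)).map scoreOf

def buildF (m : PySem.Dict Int (List Int)) (pr : String × String × String × String × Int) :
    PySem.Dict Int (List Int) :=
  if m.contains (key4 pr) then m.modify (key4 pr) [] (· ++ [scoreOf pr])
  else m.insert (key4 pr) [scoreOf pr]

theorem pv_witness_ok :
    Dom_solution pvWitness_solution.1 pvWitness_solution.2 ∧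
    Pre_solution pvWitness_solution.1 pvWitness_solution.2 := by
  constructor <;> decide

theorem parse_info (i : String) (h : infoOK i = true) :
    ∃ l p e f s, (PySem.Str.split? i " ").getD [] = [l, p, e, f, s] ∧
      validP (parsePerson i) = true ∧
      parsePerson i = (l, p, e, f, (PySem.Int.ofStr? s).getD 0) := by
  unfold infoOK at h
  rcases hts : (PySem.Str.split? i " ").getD [] with _ | ⟨l, _ | ⟨p, _ | ⟨e, _ | ⟨f, _ | ⟨s, _ | ⟨x, rest⟩⟩⟩⟩⟩⟩ <;>
    rw [hts] at h <;> simp only [Bool.and_eq_true] at h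
  · exact absurd h (by simp)
  · exact absurd h (by simp)
  · exact absurd h (by simp)
  · exact absurd h (by simp)
  · exact absurd h (by simp)
  · refine ⟨l, p, e, f, s, rfl, ?_, ?_⟩
    · simp only [validP, parsePerson, hts]
      simp only [List.getD, List.getElem?_cons_zero, List.getElem?_cons_succ, Option.getD_some]
      simp only [List.contains_eq_mem, Bool.and_eq_true, decide_eq_true_eq] at h ⊢
      tauto
    · simp [parsePerson, hts]
  · exact absurd h (by simp)

theorem stepA_eq_buildF (i : String) (h : infoOK i = true) (m : PySem.Dict Int (List Int)) :
    (let sepInfo := (PySem.Str.split? i " ").getD []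
     let key := calKey (PySem.List.slice sepInfo none (some (-1)))
     if m.contains key then
       m.modify key [] (· ++ [(PySem.Int.ofStr? (PySem.List.pyGetD sepInfo (-1) "")).getD 0])
     else
       m.insert key [(PySem.Int.ofStr? (PySem.List.pyGetD sepInfo (-1) "")).getD 0])
    = buildF m (parsePerson i) := by
  obtain ⟨l, p, e, f, s, hts, -, hpp⟩ := parse_info i h
  simp only [hts, PySem.List.slice_to_neg_one]
  rw [PySem.List.pyGetD_neg_one _ _ (by simp)]
  simp [buildF, hpp, key4, scoreOf, List.getLast]

theorem build_getD (people : List (String × String × String × String × Int))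
    (d : PySem.Dict Int (List Int)) (c : Int) :
    (people.foldl buildF d).getD c [] = d.getD c [] ++ bucket people c := by
  induction people generalizing d with
  | nil => simp [bucket]
  | cons pr rest ih =>
    rw [List.foldl_cons, ih]
    have hb : bucket (pr :: rest) c =
        if key4 pr == c then scoreOf pr :: bucket rest c else bucket rest c := by
      simp only [bucket, List.filter_cons]
      split <;> simp
    rw [hb]
    have hstep : (buildF d pr).getD c []
        = if key4 pr = c then d.getD c [] ++ [scoreOf pr] else d.getD c [] := by
      unfold buildF
      by_cases hc : d.contains (key4 pr) = true
      · rw [if_pos hc, PySem.Dict.getD_modify]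
        by_cases hk : c = key4 pr
        · subst hk; simp
        · rw [if_neg hk, if_neg (fun h => hk h.symm)]
      · rw [if_neg hc, PySem.Dict.getD_insert]
        simp only [Bool.not_eq_true] at hc
        by_cases hk : c = key4 pr
        · subst hk
          rw [if_pos rfl, if_pos rfl, PySem.Dict.getD_of_not_contains d [] hc]
          simp
        · rw [if_neg hk, if_neg (fun h => hk h.symm)]
    rw [hstep]
    by_cases hk : key4 pr = c <;> simp [hk]

theorem build_contains (people : List (String × String × String × String × Int))
    (d : PySem.Dict Int (List Int)) (c : Int) :
    (people.foldl buildF d).contains c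
      = (d.contains c || people.any (fun pr => key4 pr == c)) := by
  induction people generalizing d with
  | nil => simp
  | cons pr rest ih =>
    rw [List.foldl_cons, ih]
    have hstep : (buildF d pr).contains c = (d.contains c || (key4 pr == c)) := by
      unfold buildF
      by_cases hc : d.contains (key4 pr) = true
      · rw [if_pos hc, PySem.Dict.contains_modify]
        by_cases hk : key4 pr = c
        · subst hk; simp [hc]
        · have h1 : (c == key4 pr) = false := by simp [Ne.symm hk]
          have h2 : (key4 pr == c) = false := by simp [hk]
          simp [h1, h2]
      · rw [if_neg hc, PySem.Dict.contains_insert]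
        by_cases hk : key4 pr = c
        · subst hk; simp
        · have h1 : (c == key4 pr) = false := by simp [Ne.symm hk]
          have h2 : (key4 pr == c) = false := by simp [hk]
          simp [h1, h2]
    rw [hstep, Bool.or_assoc]
    simp [List.any_cons]

theorem sort_getD (ks : List Int) (d : PySem.Dict Int (List Int)) (c : Int) :
    ((ks.foldl (fun m k => m.insert k (PySem.List.sorted (m.getD k []) (fun x => x) false)) d).getD c [])
      = if c ∈ ks then PySem.List.sorted (d.getD c []) (fun x => x) false else d.getD c [] := by
  induction ks generalizing d with
  | nil => simp
  | cons k rest ih =>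
    rw [List.foldl_cons, ih]
    by_cases hc : c = k
    · subst hc
      by_cases hr : c ∈ rest <;>
        simp [hr, PySem.Dict.getD_insert, PySem.List.sorted_sorted]
    · by_cases hr : c ∈ rest <;>
        simp [hr, hc, PySem.Dict.getD_insert]

theorem sort_contains (ks : List Int) (d : PySem.Dict Int (List Int)) (c : Int) :
    ((ks.foldl (fun m k => m.insert k (PySem.List.sorted (m.getD k []) (fun x => x) false)) d).contains c)
      = (decide (c ∈ ks) || d.contains c) := by
  induction ks generalizing d with
  | nil => simp
  | cons k rest ih =>
    rw [List.foldl_cons, ih]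
    by_cases hc : c = k <;> by_cases hr : c ∈ rest <;>
      simp [hc, hr, PySem.Dict.contains_insert]

theorem dict_get?_eq (d : PySem.Dict Int (List Int)) (c : Int) :
    d.get? c = if d.contains c = true then some (d.getD c []) else none := by
  cases h : d.get? c <;>
    simp [PySem.Dict.contains_eq_isSome_get?, h, PySem.Dict.getD_eq_get?_getD]

theorem le_getLast_of_pairwise (l : List Int) (h : l.Pairwise (· ≤ ·)) (hne : l ≠ []) :
    ∀ x ∈ l, x ≤ l.getLast hne := by
  intro x hx
  obtain ⟨i, hi, rfl⟩ := List.mem_iff_getElem.mp hx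
  rw [List.getLast_eq_getElem]
  rcases Nat.lt_or_ge i (l.length - 1) with h1 | h1
  · exact List.pairwise_iff_getElem.mp h i (l.length - 1) hi (by omega) h1
  · have : i = l.length - 1 := by omega
    subst this; exact le_refl _

-- binary search: with j the first index ≥ target, the loop converges to j
theorem lowerboundGo_eq (arr : List Int) (t : Int) (j : Nat)
    (hlow : ∀ i (h : i < arr.length), i < j → arr[i] < t)
    (hhigh : ∀ i (h : i < arr.length), j ≤ i → t ≤ arr[i]) :
    ∀ fuel (l r : Int), 0 ≤ l → l ≤ (j : Int) → (j : Int) ≤ r → r < (arr.length : Int) →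
      (r - l).toNat ≤ fuel → lowerboundGo arr t fuel l r = j := by
  intro fuel
  induction fuel with
  | zero =>
    intro l r h0 h1 h2 h3 hf
    have hr : r = (j : Int) := by omega
    exact hr
  | succ fuel ih =>
    intro l r h0 h1 h2 h3 hf
    by_cases hlr : l < r
    · have hmid : PySem.Int.floordiv (l + r) 2 = (l + r) / 2 := by
        rcases (PySem.Int.floordiv_eq_iff_of_pos (a := l + r) (b := 2)
          (q := PySem.Int.floordiv (l + r) 2) (by norm_num)).mp rfl with ⟨ha, hb⟩
        omega
      set mid := PySem.Int.floordiv (l + r) 2 with hm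
      have hmid1 : l ≤ mid := by rw [hmid]; omega
      have hmid2 : mid < r := by rw [hmid]; omega
      have hmid0 : 0 ≤ mid := by omega
      have hmidlen : mid < (arr.length : Int) := by omega
      have hget : PySem.List.pyGetD arr mid 0 = arr[mid.toNat]'(by omega) :=
        PySem.List.pyGetD_eq_getElem arr 0 hmid0 hmidlen
      rw [lowerboundGo]
      simp only [hlr, if_true]
      rw [← hm, hget]
      by_cases hcmp : arr[mid.toNat]'(by omega) < t
      · -- mid < j
        have hmj : mid < (j : Int) := by
          by_contra hcon
          push Not at hcon
          exact absurd (hhigh mid.toNat (by omega) (by omega)) (by omega)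
        simp only [hcmp, if_true]
        exact ih (mid + 1) r (by omega) (by omega) h2 h3 (by omega)
      · -- j ≤ mid
        have hjm : (j : Int) ≤ mid := by
          by_contra hcon
          push Not at hcon
          exact absurd (hlow mid.toNat (by omega) (by omega)) (by omega)
        simp only [hcmp, if_false]
        exact ih l mid h0 h1 hjm (by omega) (by omega)
    · have hr : r = (j : Int) := by omega
      have hred : lowerboundGo arr t (fuel+1) l r = r := by
        rw [lowerboundGo]
        simp [hlr]
      rw [hred, hr]

theorem lowerbound_count (arr : List Int) (t : Int)
    (hsort : arr.Pairwise (· ≤ ·)) (hne : arr ≠ [])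
    (hlast : t ≤ arr.getLast hne) :
    lowerbound arr t = (arr.countP (fun x => decide (x < t)) : Int) := by
  set j := arr.countP (fun x => decide (x < t)) with hj
  have hmono : ∀ (a b : Nat) (ha : a < arr.length) (hb : b < arr.length), a ≤ b → arr[a] ≤ arr[b] := by
    intro a b ha hb hab
    rcases Nat.lt_or_ge a b with h | h
    · exact List.pairwise_iff_getElem.mp hsort a b ha hb h
    · have : a = b := by omega
      subst this; exact le_refl _
  have hlow : ∀ i (h : i < arr.length), i < j → arr[i] < t := by
    intro i hi hij
    by_contra hcon
    push Not at hcon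
    -- all indices ≥ i are ≥ t, so countP (< t) ≤ i
    have hdrop : (arr.drop i).countP (fun x => decide (x < t)) = 0 := by
      rw [List.countP_eq_zero]
      intro a ha
      obtain ⟨m, hm, rfl⟩ := List.mem_iff_getElem.mp ha
      rw [List.getElem_drop]
      have := hmono i (i + m) hi (by simp at hm; omega) (by omega)
      simp only [decide_eq_true_eq]
      omega
    have hsplit : j = (arr.take i).countP (fun x => decide (x < t)) := by
      conv_lhs => rw [hj, ← List.take_append_drop i arr]
      rw [List.countP_append, hdrop]
      omega
    have : j ≤ i := by
      rw [hsplit]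
      calc (arr.take i).countP _ ≤ (arr.take i).length := List.countP_le_length
        _ ≤ i := by simp
    omega
  have hhigh : ∀ i (h : i < arr.length), j ≤ i → t ≤ arr[i] := by
    intro i hi hij
    by_contra hcon
    push Not at hcon
    have htake : (arr.take (i+1)).countP (fun x => decide (x < t)) = (arr.take (i+1)).length := by
      rw [List.countP_eq_length]
      intro a ha
      obtain ⟨m, hm, rfl⟩ := List.mem_iff_getElem.mp ha
      rw [List.getElem_take]
      have hmlt : m < i + 1 := by simp at hm; omega
      have := hmono m i (by omega) hi (by omega)
      simp only [decide_eq_true_eq]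
      omega
    have : i + 1 ≤ j := by
      conv_rhs => rw [hj, ← List.take_append_drop (i+1) arr]
      rw [List.countP_append, htake]
      have : (arr.take (i+1)).length = i + 1 := by simp; omega
      omega
    omega
  have hlen0 : 0 < arr.length := List.length_pos_iff.mpr hne
  have hjlt : j < arr.length := by
    rcases Nat.lt_or_ge j arr.length with h | h
    · exact h
    · exfalso
      have hjle : j ≤ arr.length := List.countP_le_length
      have : j = arr.length := by omega
      have hall : ∀ a ∈ arr, decide (a < t) = true := List.countP_eq_length.mp (by omega)
      have := hall (arr.getLast hne) (List.getLast_mem hne)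
      simp at this
      omega
  unfold lowerbound
  exact lowerboundGo_eq arr t j hlow hhigh arr.length 0 ((arr.length : Int) - 1)
    (by omega) (by exact_mod_cast Nat.zero_le j) (by omega) (by omega) (by omega)

theorem countP_disj {α : Type} (l : List α) (p q : α → Bool)
    (h : ∀ x ∈ l, ¬(p x = true ∧ q x = true)) :
    l.countP (fun x => p x || q x) = l.countP p + l.countP q := by
  induction l with
  | nil => simp
  | cons a rest ih =>
    have hrest := ih (fun x hx => h x (List.mem_cons_of_mem a hx))
    have ha := h a (List.mem_cons_self)
    simp only [List.countP_cons, hrest]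
    by_cases hp : p a = true <;> by_cases hq : q a = true <;>
      simp [hp, hq] at ha ⊢ <;> omega

theorem sum_keys (keys : List Int) (hnd : keys.Nodup)
    (people : List (String × String × String × String × Int)) (P : (String × String × String × String × Int) → Bool) :
    (keys.map (fun k => (people.countP (fun pr => key4 pr == k && P pr) : Int))).sum
      = (people.countP (fun pr => decide (key4 pr ∈ keys) && P pr) : Int) := by
  induction keys with
  | nil => simp
  | cons k ks ih =>
    obtain ⟨hk, hnd'⟩ := List.nodup_cons.mp hnd
    rw [List.map_cons, List.sum_cons, ih hnd']
    have hsplit : people.countP (fun pr => decide (key4 pr ∈ k :: ks) && P pr)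
        = people.countP (fun pr => key4 pr == k && P pr)
          + people.countP (fun pr => decide (key4 pr ∈ ks) && P pr) := by
      rw [← countP_disj people _ _ ?disj]
      · apply List.countP_congr
        intro pr _
        by_cases h1 : key4 pr = k <;> by_cases h2 : key4 pr ∈ ks <;>
          simp [h1, h2]
      case disj =>
        intro pr _
        rintro ⟨h1, h2⟩
        simp only [Bool.and_eq_true, beq_iff_eq, decide_eq_true_eq] at h1 h2
        exact hk (h1.1 ▸ h2.1)
    rw [hsplit]
    push_cast
    ring

theorem keys_nodup :
    ∀ q0 ∈ ["-","cpp","java","python"], ∀ q1 ∈ ["-","frontend","backend"],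
    ∀ q2 ∈ ["-","junior","senior"], ∀ q3 ∈ ["-","pizza","chicken"],
      (calQueryKeys [q0, q1, q2, q3]).Nodup := by decide

theorem key_mem_iff :
    ∀ q0 ∈ ["-","cpp","java","python"], ∀ q1 ∈ ["-","frontend","backend"],
    ∀ q2 ∈ ["-","junior","senior"], ∀ q3 ∈ ["-","pizza","chicken"],
    ∀ l ∈ ["cpp","java","python"], ∀ p ∈ ["frontend","backend"],
    ∀ e ∈ ["junior","senior"], ∀ f ∈ ["pizza","chicken"],
      decide (calKey [l, p, e, f] ∈ calQueryKeys [q0, q1, q2, q3])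
        = ((q0 == "-" || q0 == l) && (q1 == "-" || q1 == p)
           && (q2 == "-" || q2 == e) && (q3 == "-" || q3 == f)) := by decide

theorem parse_query (q : String) (h : queryOK q = true) :
    ∃ a b c d s, (PySem.Str.split? (PySem.Str.replace q " and " " ") " ").getD [] = [a, b, c, d, s] ∧
      a ∈ ["-","cpp","java","python"] ∧ b ∈ ["-","frontend","backend"] ∧
      c ∈ ["-","junior","senior"] ∧ d ∈ ["-","pizza","chicken"] := by
  unfold queryOK at h
  rcases hts : (PySem.Str.split? (PySem.Str.replace q " and " " ") " ").getD [] with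
    _ | ⟨a, _ | ⟨b, _ | ⟨c, _ | ⟨d, _ | ⟨s, _ | ⟨x, rest⟩⟩⟩⟩⟩⟩ <;>
    rw [hts] at h <;> simp only [Bool.and_eq_true] at h
  · exact absurd h (by simp)
  · exact absurd h (by simp)
  · exact absurd h (by simp)
  · exact absurd h (by simp)
  · exact absurd h (by simp)
  · refine ⟨a, b, c, d, s, rfl, ?_, ?_, ?_, ?_⟩ <;>
      simp only [List.contains_eq_mem, decide_eq_true_eq] at h
    · exact h.1.1.1.1
    · exact h.1.1.1.2
    · exact h.1.1.2
    · exact h.1.2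
  · exact absurd h (by simp)


theorem query_count (people : List (String × String × String × String × Int))
    (m2 : PySem.Dict Int (List Int))
    (hget : ∀ c, m2.get? c = if bucket people c = [] then none
        else some (PySem.List.sorted (bucket people c) (fun x => x) false))
    (hval : ∀ pr ∈ people, validP pr = true)
    (q : String) (hq : queryOK q = true) :
    (let sepQuery := (PySem.Str.split? (PySem.Str.replace q " and " " ") " ").getD []
     let keys := calQueryKeys (PySem.List.slice sepQuery none (some (-1)))
     keys.foldl (fun cnt key =>
       match m2.get? key with
       | none => cnt
       | some arr =>
         if PySem.List.pyGetD arr (-1) 0 <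
             (PySem.Int.ofStr? (PySem.List.pyGetD sepQuery (-1) "")).getD 0 then cnt
         else cnt + ((arr.length : Int) -
             lowerbound arr ((PySem.Int.ofStr? (PySem.List.pyGetD sepQuery (-1) "")).getD 0)) ) 0)
    = ((people.countP (matchesQ ((PySem.Str.split? (PySem.Str.replace q " and " " ") " ").getD [])) : Int)) := by
  obtain ⟨a, b, c, d, s, hts, ha, hb, hc, hd⟩ := parse_query q hq
  simp only [hts, PySem.List.slice_to_neg_one, List.dropLast]
  rw [PySem.List.pyGetD_neg_one _ _ (by simp : ([a,b,c,d,s] : List String) ≠ [])]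
  simp only [List.getLast, List.getD, List.getElem?_cons_zero, List.getElem?_cons_succ,
    Option.getD_some]
  set th := (PySem.Int.ofStr? s).getD 0 with hth
  have hstep : ∀ (cnt k : Int),
      (match m2.get? k with
       | none => cnt
       | some arr =>
         if PySem.List.pyGetD arr (-1) 0 < th then cnt
         else cnt + ((arr.length : Int) - lowerbound arr th))
      = cnt + (people.countP (fun pr => key4 pr == k && decide (th ≤ scoreOf pr)) : Int) := by
    intro cnt k
    rw [hget k]
    by_cases hbe : bucket people k = []
    · rw [if_pos hbe]
      have hz : people.countP (fun pr => key4 pr == k && decide (th ≤ scoreOf pr)) = 0 := by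
        rw [List.countP_eq_zero]
        intro pr hpr
        have hnk : ¬ (key4 pr == k) = true := by
          intro hkk
          have hmem : scoreOf pr ∈ bucket people k :=
            List.mem_map.2 ⟨pr, List.mem_filter.2 ⟨hpr, hkk⟩, rfl⟩
          rw [hbe] at hmem
          exact absurd hmem (List.not_mem_nil)
        simp [hnk]
      simp [hz]
    · rw [if_neg hbe]
      set arr := PySem.List.sorted (bucket people k) (fun x => x) false with harr
      have harrne : arr ≠ [] := by
        rw [harr]
        simpa [PySem.List.sorted_eq_nil_iff] using hbe
      have hpw : arr.Pairwise (· ≤ ·) := by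
        simpa using PySem.List.sorted_pairwise (bucket people k) (fun x => x)
      have hperm : arr.Perm (bucket people k) := PySem.List.sorted_perm _ _ _
      have hcnt : arr.countP (fun x => decide (th ≤ x))
          = people.countP (fun pr => key4 pr == k && decide (th ≤ scoreOf pr)) := by
        rw [hperm.countP_eq]
        unfold bucket
        rw [List.countP_map, List.countP_filter]
        apply List.countP_congr
        intro pr _
        simp [Function.comp, Bool.and_comm]
      have hmatch : (match some arr with
          | none => cnt
          | some arr =>
            if PySem.List.pyGetD arr (-1) 0 < th then cnt
            else cnt + ((arr.length : Int) - lowerbound arr th))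
          = if PySem.List.pyGetD arr (-1) 0 < th then cnt
            else cnt + ((arr.length : Int) - lowerbound arr th) := rfl
      rw [hmatch]
      rw [PySem.List.pyGetD_neg_one _ _ harrne]
      by_cases hlt : arr.getLast harrne < th
      · rw [if_pos hlt]
        have hz : arr.countP (fun x => decide (th ≤ x)) = 0 := by
          rw [List.countP_eq_zero]
          intro x hx
          have := le_getLast_of_pairwise arr hpw harrne x hx
          simp only [decide_eq_true_eq]
          omega
        rw [← hcnt, hz]
        simp
      · rw [if_neg hlt]
        have hlast : th ≤ arr.getLast harrne := by omega
        have hlb := lowerbound_count arr th hpw harrne hlast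
        have hsum : arr.length = arr.countP (fun x => decide (x < th))
            + arr.countP (fun x => decide (th ≤ x)) := by
          rw [List.length_eq_countP_add_countP (fun x => decide (x < th))]
          congr 1
          apply List.countP_congr
          intro x _
          simp only [decide_eq_true_eq, decide_not]
          constructor <;> intro <;> simp_all
        rw [hlb, ← hcnt]
        omega
  rw [PySem.List.foldl_congr_mem _ _ _ 0 (fun cnt k _ => hstep cnt k)]
  rw [PySem.List.foldl_add]
  rw [sum_keys _ (keys_nodup a ha b hb c hc d hd) people _]
  rw [Int.zero_add]
  congr 1
  apply List.countP_congr
  intro pr hpr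
  have hv := hval pr hpr
  simp only [validP, Bool.and_eq_true, List.contains_eq_mem, decide_eq_true_eq] at hv
  have hmem := key_mem_iff a ha b hb c hc d hd pr.1 hv.1.1.1 pr.2.1 hv.1.1.2
    pr.2.2.1 hv.1.2 pr.2.2.2.1 hv.2
  have hmq : matchesQ [a, b, c, d, s] pr
      = ((a == "-" || a == pr.1) && (b == "-" || b == pr.2.1) && (c == "-" || c == pr.2.2.1)
          && (d == "-" || d == pr.2.2.2.1) && decide (th ≤ pr.2.2.2.2)) := by
    simp [matchesQ, List.getD, hth]
  rw [hmq]
  have hk4 : decide (key4 pr ∈ calQueryKeys [a, b, c, d])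
      = ((a == "-" || a == pr.1) && (b == "-" || b == pr.2.1) && (c == "-" || c == pr.2.2.1)
          && (d == "-" || d == pr.2.2.2.1)) := hmem
  rw [hk4]
  simp [scoreOf]

theorem solution_spec : Claim_equal_solution := by
  intro info query _ hpre
  obtain ⟨hinfo, hq2⟩ := hpre
  rcases hq2 with hquery | ⟨hinfoemp, -⟩
  case inr =>
    -- empty info: A looks nothing up and appends 0 per query; B counts over no people
    subst hinfoemp
    unfold Spec_solution solution solution_alt
    exact PySem.List.foldl_congr_mem query _ _ []
      (fun answer q _ => congrArg (fun z => answer ++ [z])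
        (PySem.List.foldl_ignore (calQueryKeys (PySem.List.slice
          ((PySem.Str.split? (PySem.Str.replace q " and " " ") " ").getD [])
          none (some (-1)))) 0))
  have hinfoOK : ∀ i ∈ info, infoOK i = true := fun i hi => List.all_eq_true.mp hinfo i hi
  have hqOK : ∀ q' ∈ query, queryOK q' = true := fun q' hq' => List.all_eq_true.mp hquery q' hq'
  have hval : ∀ pr ∈ info.map parsePerson, validP pr = true := by
    intro pr hpr
    obtain ⟨i, hi, rfl⟩ := List.mem_map.mp hpr
    obtain ⟨_, _, _, _, _, _, hvp, _⟩ := parse_info i (hinfoOK i hi)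
    exact hvp
  have hm1 : (info.foldl (fun m i =>
        let sepInfo := (PySem.Str.split? i " ").getD []
        let key := calKey (PySem.List.slice sepInfo none (some (-1)))
        if m.contains key then
          m.modify key [] (· ++ [(PySem.Int.ofStr? (PySem.List.pyGetD sepInfo (-1) "")).getD 0])
        else
          m.insert key [(PySem.Int.ofStr? (PySem.List.pyGetD sepInfo (-1) "")).getD 0])
      PySem.Dict.empty)
      = (info.map parsePerson).foldl buildF PySem.Dict.empty := by
    rw [List.foldl_map]
    exact PySem.List.foldl_congr_mem info _ _ PySem.Dict.empty
      (fun m i hi => stepA_eq_buildF i (hinfoOK i hi) m)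
  unfold Spec_solution solution solution_alt
  rw [hm1]
  set people := info.map parsePerson with hpeod
  set m1 := people.foldl buildF PySem.Dict.empty with hm1d
  set m2 := m1.keys.foldl
      (fun m k => m.insert k (PySem.List.sorted (m.getD k []) (fun x => x) false)) m1 with hm2d
  have hcont1 : ∀ c, m1.contains c = people.any (fun pr => key4 pr == c) := by
    intro c; rw [hm1d, build_contains]; simp
  have hgd1 : ∀ c, m1.getD c [] = bucket people c := by
    intro c; rw [hm1d, build_getD]; simp
  have hget : ∀ c, m2.get? c = if bucket people c = [] then none
      else some (PySem.List.sorted (bucket people c) (fun x => x) false) := by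
    intro c
    have hbne : bucket people c ≠ [] ↔ people.any (fun pr => key4 pr == c) = true := by
      constructor
      · intro hne
        obtain ⟨x, hx⟩ := List.exists_mem_of_ne_nil _ hne
        unfold bucket at hx
        obtain ⟨pr, hpr, -⟩ := List.mem_map.mp hx
        have hf := List.mem_filter.mp hpr
        exact List.any_eq_true.mpr ⟨pr, hf.1, hf.2⟩
      · intro hany hbe
        obtain ⟨pr, hpr, hk⟩ := List.any_eq_true.mp hany
        have hmem : scoreOf pr ∈ bucket people c :=
          List.mem_map.2 ⟨pr, List.mem_filter.2 ⟨hpr, hk⟩, rfl⟩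
        rw [hbe] at hmem
        exact absurd hmem (List.not_mem_nil)
    have hc2 : m2.contains c = people.any (fun pr => key4 pr == c) := by
      rw [hm2d, sort_contains]
      by_cases hmc : m1.contains c = true
      · have hkm : c ∈ m1.keys := (PySem.Dict.contains_iff_mem_keys m1 c).mp hmc
        rw [← hcont1 c]
        simp [hkm, hmc]
      · have hkm : c ∉ m1.keys := fun hmem => hmc ((PySem.Dict.contains_iff_mem_keys m1 c).mpr hmem)
        have hcf : m1.contains c = false := by
          cases h : m1.contains c
          · rfl
          · exact absurd h hmc
        rw [← hcont1 c]
        simp [hkm, hcf]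
    have hg2 : m2.getD c [] = PySem.List.sorted (bucket people c) (fun x => x) false := by
      rw [hm2d, sort_getD]
      by_cases hkm : c ∈ m1.keys
      · rw [if_pos hkm, hgd1]
      · rw [if_neg hkm]
        have hcf : m1.contains c = false := by
          cases h : m1.contains c
          · rfl
          · exact absurd ((PySem.Dict.contains_iff_mem_keys m1 c).mp h) hkm
        have hbe : bucket people c = [] := by
          rw [← hgd1 c]
          exact PySem.Dict.getD_of_not_contains m1 [] hcf
        rw [hgd1, hbe]
        rfl
    rw [dict_get?_eq]
    by_cases hbe : bucket people c = []
    · have hanyf : people.any (fun pr => key4 pr == c) = false := by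
        cases h : people.any (fun pr => key4 pr == c)
        · rfl
        · exact absurd hbe (hbne.mpr h)
      rw [if_pos hbe]
      simp [hc2, hanyf]
    · rw [if_neg hbe]
      have hany := hbne.mp hbe
      simp [hc2, hany, hg2]
  exact PySem.List.foldl_congr_mem query _ _ []
    (fun answer q hqm =>
      congrArg (fun z => answer ++ [z]) (query_count people m2 hget hval q (hqOK q hqm)))
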